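-- pv_equiv track=rewrite | github.com/gdmedc/CMD-MTG-Project | mtgProject.py | compare_color
-- ===== SOURCE A (Python) =====
-- def color_str(list):
--     """
--     Converts elements of a list into a single string
--
--     Args:
--         list (list): List of any length containing any types
--
--     Returns:
--         string: String consisting of list elements
--     """
--     cString = ""
--     for color in list:
--         cString += color
--     if cString == "":
--         cString = "Colorless"
--     return cString
--
-- def compare_color(pCard, mCard):
--     """
--     Run a comparison of color identities between given cards
--
--     Args:
--         pCard (string): JSON card object
--         mCard (string): JSON card object
--
--     Returns:
--         string: String describing result of comparison
--     """
--     pColors = pCard["color_identity"]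
--     mColors = mCard["color_identity"]
--
--     pString = color_str(pColors)
--     mString = color_str(mColors)
--
--     if pString == mString:
--         return "Correct!"
--
--     for pID in pString:
--         for mID in mString:
--             if pID == mID:
--                 return "Partial Match!"
--
--     return "Incorrect!"
-- ===== SOURCE B (Python) =====
-- def compare_color(pCard, mCard):
--     pString = "".join(pCard["color_identity"]) or "Colorless"
--     mString = "".join(mCard["color_identity"]) or "Colorless"
--     if pString == mString:
--         return "Correct!"
--     # sort-then-merge: walk two sorted character sequences with two pointers
--     a, b = sorted(pString), sorted(mString)
--     i = j = 0
--     while i < len(a) and j < len(b):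
--         if a[i] == b[j]:
--             return "Partial Match!"
--         if a[i] < b[j]:
--             i += 1
--         else:
--             j += 1
--     return "Incorrect!"
-- ===== Notes on version B (the rewrite author's own statement) =====
-- stated objective: alternative
-- what changed: color_str's accumulating loop becomes ''.join(...) or 'Colorless', and the nested character double loop is replaced by sorting both strings and running a two-pointer merge scan that detects a common character.
import Mathlib
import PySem

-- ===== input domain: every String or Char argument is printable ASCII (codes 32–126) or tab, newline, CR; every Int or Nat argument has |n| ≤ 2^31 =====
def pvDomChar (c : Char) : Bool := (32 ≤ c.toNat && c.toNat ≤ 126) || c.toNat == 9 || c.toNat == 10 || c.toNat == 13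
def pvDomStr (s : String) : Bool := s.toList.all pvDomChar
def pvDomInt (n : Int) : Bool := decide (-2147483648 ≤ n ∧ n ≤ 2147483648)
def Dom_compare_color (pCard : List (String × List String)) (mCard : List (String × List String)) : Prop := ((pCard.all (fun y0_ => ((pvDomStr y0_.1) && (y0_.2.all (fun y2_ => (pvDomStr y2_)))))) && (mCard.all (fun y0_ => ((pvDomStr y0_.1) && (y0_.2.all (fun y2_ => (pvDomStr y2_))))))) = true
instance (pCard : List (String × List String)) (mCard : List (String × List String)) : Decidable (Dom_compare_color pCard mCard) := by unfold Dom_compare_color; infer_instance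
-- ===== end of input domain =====

-- B builds the strings with ''.join(...) or "Colorless" and replaces A's nested character
-- double loop by sorting both strings and a two-pointer merge scan for a common character.

-- ===== PORT A =====
-- color_str: cString = ""; for color in list: cString += color; if cString == "": "Colorless"
def colorStrA (l : List String) : List Char :=
  let cString := l.foldl (fun acc color => acc ++ color.toList) []
  if cString = [] then "Colorless".toList else cString

-- inner loop: for mID in mString: if pID == mID: return True
def innerLoopA (pID : Char) : List Char → Bool
  | [] => false
  | mID :: rest => if pID = mID then true else innerLoopA pID rest

-- outer loop: for pID in pString: …; falls through to "Incorrect!"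
def outerLoopA (mString : List Char) : List Char → String
  | [] => "Incorrect!"
  | pID :: rest => if innerLoopA pID mString then "Partial Match!" else outerLoopA mString rest

def compare_color (pCard : List (String × List String)) (mCard : List (String × List String)) : String :=
  match (PySem.Dict.mk pCard).get? "color_identity", (PySem.Dict.mk mCard).get? "color_identity" with
  | some pColors, some mColors =>
    let pString := colorStrA pColors
    let mString := colorStrA mColors
    if pString = mString then "Correct!"
    else outerLoopA mString pString
  | _, _ => ""   -- KeyError in Python; excluded by Pre_

-- ===== PORT B =====
def colorStrB (l : List String) : List Char :=
  let j := l.flatMap String.toList        -- "".join(l)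
  if j = [] then "Colorless".toList else j  -- … or "Colorless"

-- the two-pointer while loop over the two sorted character lists
def mergeScan : List Char → List Char → Bool
  | a :: as, b :: bs =>
    if a = b then true
    else if a < b then mergeScan as (b :: bs)
    else mergeScan (a :: as) bs
  | _, _ => false

def compare_color_alt (pCard : List (String × List String)) (mCard : List (String × List String)) : String :=
  match (PySem.Dict.mk pCard).get? "color_identity" with
  | none => ""   -- KeyError in Python; excluded by Pre_
  | some pColors =>
    match (PySem.Dict.mk mCard).get? "color_identity" with
    | none => ""   -- KeyError in Python; excluded by Pre_
    | some mColors =>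
      let pString := colorStrB pColors
      let mString := colorStrB mColors
      if pString = mString then "Correct!"
      else if mergeScan (PySem.List.sorted pString (fun c => c) false)
                        (PySem.List.sorted mString (fun c => c) false) then "Partial Match!"
      else "Incorrect!"

-- ===== PRECONDITION & SPEC =====
-- Pre_ excludes exactly the inputs where Python raises KeyError (both A and B index with ["color_identity"]).
def Pre_compare_color (pCard : List (String × List String)) (mCard : List (String × List String)) : Prop :=
  ((PySem.Dict.mk pCard).get? "color_identity").isSome ∧ ((PySem.Dict.mk mCard).get? "color_identity").isSome
instance (pCard : List (String × List String)) (mCard : List (String × List String)) : Decidable (Pre_compare_color pCard mCard) := by unfold Pre_compare_color; infer_instance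

def pvWitness_compare_color : (List (String × List String)) × (List (String × List String)) :=
  ([("color_identity", ["W", "U"])], [("color_identity", [])])

def Spec_compare_color (pCard : List (String × List String)) (mCard : List (String × List String)) (out : String) : Prop := out = compare_color_alt pCard mCard
instance (pCard : List (String × List String)) (mCard : List (String × List String)) (out : String) : Decidable (Spec_compare_color pCard mCard out) := by unfold Spec_compare_color; infer_instance

-- ===== CLAIM =====
def Claim_equal_compare_color : Prop := ∀ (pCard : List (String × List String)) (mCard : List (String × List String)), Dom_compare_color pCard mCard → Pre_compare_color pCard mCard → Spec_compare_color pCard mCard (compare_color pCard mCard)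

-- ===== LEMMAS AND PROOFS =====

theorem colorStr_eq (l : List String) : colorStrA l = colorStrB l := by
  unfold colorStrA colorStrB
  rw [PySem.List.foldl_append_eq_flatMap]
  simp

theorem innerLoopA_eq (pID : Char) (ms : List Char) :
    innerLoopA pID ms = ms.contains pID := by
  induction ms with
  | nil => rfl
  | cons m rest ih =>
    simp only [innerLoopA, List.contains_cons]
    by_cases h : pID = m <;> simp [h, ih]

theorem outerLoopA_eq (ps ms : List Char) :
    outerLoopA ms ps = if ps.any (fun c => ms.contains c) then "Partial Match!" else "Incorrect!" := by
  induction ps with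
  | nil => rfl
  | cons p rest ih =>
    simp only [outerLoopA, innerLoopA_eq, List.any_cons]
    by_cases h : p ∈ ms <;> simp [h, ih]

-- on sorted inputs, the merge scan decides whether the lists share an element
theorem mergeScan_eq_any (as bs : List Char)
    (ha : as.Pairwise (· ≤ ·)) (hb : bs.Pairwise (· ≤ ·)) :
    mergeScan as bs = as.any (fun c => bs.contains c) := by
  induction as generalizing bs with
  | nil => simp [mergeScan]
  | cons a as iha =>
    induction bs with
    | nil => simp [mergeScan]
    | cons b bs ihb =>
      rw [mergeScan]
      by_cases hab : a = b
      · simp [hab]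
      · rw [if_neg hab]
        rcases lt_or_gt_of_ne hab with hlt | hgt
        · -- a < b: a is smaller than every element of b :: bs, so a contributes nothing
          rw [if_pos hlt, iha (b :: bs) (List.pairwise_cons.mp ha).2 hb]
          have hnotin : a ∉ b :: bs := by
            intro hmem
            rcases List.mem_cons.mp hmem with h | h
            · exact hab h
            · exact absurd ((List.pairwise_cons.mp hb).1 a h) (not_le.mpr hlt)
          rw [Bool.eq_iff_iff]
          simp only [List.any_eq_true, List.contains_cons, Bool.or_eq_true, beq_iff_eq,
            List.mem_cons]
          constructor
          · rintro ⟨c, hc, h⟩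
            exact ⟨c, Or.inr hc, h⟩
          · rintro ⟨c, hc | hc, h⟩
            · subst hc
              rcases h with h | h
              · exact absurd (List.mem_cons.mpr (Or.inl h)) hnotin
              · exact absurd (List.mem_cons.mpr (Or.inr (by simpa using h))) hnotin
            · exact ⟨c, hc, h⟩
        · -- a > b: b is smaller than a and every element of as, so b matches nothing on the left
          rw [if_neg (not_lt.mpr hgt.le), ihb (List.pairwise_cons.mp hb).2]
          have hgen : ∀ c ∈ a :: as, c ≠ b := by
            intro c hc
            rcases List.mem_cons.mp hc with h | h
            · exact h ▸ ne_of_gt hgt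
            · intro hcb
              exact absurd (hcb ▸ (List.pairwise_cons.mp ha).1 c h) (not_le.mpr hgt)
          rw [Bool.eq_iff_iff]
          simp only [List.any_eq_true, List.contains_cons, Bool.or_eq_true, beq_iff_eq]
          constructor
          · rintro ⟨c, hc, hcc⟩
            exact ⟨c, hc, Or.inr hcc⟩
          · rintro ⟨c, hc, hcc⟩
            rcases hcc with h | h
            · exact absurd h (hgen c hc)
            · exact ⟨c, hc, h⟩

-- lifting the merge scan to the unsorted strings via sortedness + permutation
theorem mergeScan_sorted_eq (ps ms : List Char) :
    mergeScan (PySem.List.sorted ps (fun c => c) false) (PySem.List.sorted ms (fun c => c) false)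
      = ps.any (fun c => ms.contains c) := by
  rw [mergeScan_eq_any _ _ (PySem.List.sorted_pairwise ps (fun c => c))
        (PySem.List.sorted_pairwise ms (fun c => c)), Bool.eq_iff_iff]
  simp [List.any_eq_true, PySem.List.mem_sorted]

-- ===== VERDICT =====
theorem compare_color_spec : Claim_equal_compare_color := by
  intro pCard mCard _ hpre
  unfold Spec_compare_color compare_color compare_color_alt
  obtain ⟨hp, hm⟩ := hpre
  obtain ⟨pColors, hpc⟩ := Option.isSome_iff_exists.mp hp
  obtain ⟨mColors, hmc⟩ := Option.isSome_iff_exists.mp hm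
  rw [hpc, hmc]
  simp only [← colorStr_eq, outerLoopA_eq, mergeScan_sorted_eq]
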